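-- pv_equiv track=rewrite | github.com/henriquearpereira/AgentFlow | pdF_research_agent/agents/prompts.py | _simplify_prompt
-- ===== SOURCE A (Python) =====
-- def _simplify_prompt(prompt: str) -> str:
--     """Simplify a prompt while maintaining essential elements"""
--     # Remove redundant sections while keeping core requirements
--     lines = prompt.split('\n')
--     simplified_lines = []
--     skip_section = False
--
--     for line in lines:
--         if 'ADDITIONAL' in line.upper() or 'ENHANCED' in line.upper():
--             skip_section = True
--         elif line.strip().startswith('##') or line.strip().startswith('#'):
--             skip_section = False
--
--         if not skip_section:
--             simplified_lines.append(line)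
--
--     return '\n'.join(simplified_lines)
-- ===== SOURCE B (Python) =====
-- def _simplify_prompt(prompt: str) -> str:
--     """Segment-based rewrite: split lines into header-started segments, keep each
--     segment's prefix up to the first ADDITIONAL/ENHANCED line, then rejoin."""
--     lines = prompt.split('\n')
--     segments = []
--     cur = []
--     for line in lines:
--         if line.strip().startswith('#'):
--             segments.append(cur)
--             cur = [line]
--         else:
--             cur.append(line)
--     segments.append(cur)
--     kept = []
--     for seg in segments:
--         for line in seg:
--             u = line.upper()
--             if 'ADDITIONAL' in u or 'ENHANCED' in u:
--                 break
--             kept.append(line)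
--     return '\n'.join(kept)
-- ===== Notes on version B (the rewrite author's own statement) =====
-- stated objective: alternative
-- what changed: Replaced A's line-by-line skip-flag state machine with a group-then-filter decomposition: lines are first split into header-started segments, then each segment contributes only its prefix before the first ADDITIONAL/ENHANCED line.
import Mathlib
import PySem

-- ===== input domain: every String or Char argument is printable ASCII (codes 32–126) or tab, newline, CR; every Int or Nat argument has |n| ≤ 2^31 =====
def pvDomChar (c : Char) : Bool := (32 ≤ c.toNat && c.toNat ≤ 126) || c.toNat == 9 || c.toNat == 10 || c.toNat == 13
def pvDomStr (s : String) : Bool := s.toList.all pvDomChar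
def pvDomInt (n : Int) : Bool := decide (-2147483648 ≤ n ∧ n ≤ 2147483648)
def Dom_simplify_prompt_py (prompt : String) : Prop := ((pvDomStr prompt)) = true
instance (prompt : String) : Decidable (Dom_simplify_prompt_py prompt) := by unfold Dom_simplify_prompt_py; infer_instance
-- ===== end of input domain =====

-- B re-decomposes A's line-by-line skip-flag state machine as: split the lines into
-- header-started segments, keep each segment's prefix before its first
-- ADDITIONAL/ENHANCED line, concatenate; objective: alternative (same cost, plainer shape).

-- ===== PORT A =====
def simplify_prompt_py (prompt : String) : String :=
  let lines := (PySem.Str.split? prompt "\n").getD []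
  let r := lines.foldl (fun (st : List String × Bool) line =>
    let skip :=
      if PySem.Str.isIn "ADDITIONAL" (PySem.Str.upper line)
          || PySem.Str.isIn "ENHANCED" (PySem.Str.upper line) then
        true
      else if PySem.Str.startswith (PySem.Str.strip line) "##"
          || PySem.Str.startswith (PySem.Str.strip line) "#" then
        false
      else st.2
    (if !skip then st.1 ++ [line] else st.1, skip)) ([], false)
  PySem.Str.join "\n" r.1

-- ===== PORT B =====
def pvIsHeader (line : String) : Bool :=
  PySem.Str.startswith (PySem.Str.strip line) "#"

def pvIsTrigger (line : String) : Bool :=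
  let u := PySem.Str.upper line
  PySem.Str.isIn "ADDITIONAL" u || PySem.Str.isIn "ENHANCED" u

def simplify_prompt_py_alt (prompt : String) : String :=
  let lines := (PySem.Str.split? prompt "\n").getD []
  let st := lines.foldl (fun (st : List (List String) × List String) line =>
    if pvIsHeader line then (st.1 ++ [st.2], [line]) else (st.1, st.2 ++ [line]))
    ([], [])
  let segments := st.1 ++ [st.2]
  let kept := segments.foldl
    (fun acc seg => acc ++ seg.takeWhile (fun l => !pvIsTrigger l)) []
  PySem.Str.join "\n" kept

-- ===== PRECONDITION & SPEC =====
def Spec_simplify_prompt_py (prompt : String) (out : String) : Prop := out = simplify_prompt_py_alt prompt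
instance (prompt : String) (out : String) : Decidable (Spec_simplify_prompt_py prompt out) := by unfold Spec_simplify_prompt_py; infer_instance

-- ===== CLAIM (what is proved, stated in full; the proofs are below) =====
def Claim_equal_simplify_prompt_py : Prop := ∀ (prompt : String), Dom_simplify_prompt_py prompt → Spec_simplify_prompt_py prompt (simplify_prompt_py prompt)

-- ===== LEMMAS AND PROOFS =====

-- generic: takeWhile over an appended element
theorem pv_takeWhile_append_single {α : Type} (p : α → Bool) (xs : List α) (x : α) :
    (xs ++ [x]).takeWhile p
      = if xs.all p then xs ++ [x].takeWhile p else xs.takeWhile p := by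
  induction xs with
  | nil => simp
  | cons a as ih =>
      by_cases h : p a = true
      · simp [List.takeWhile, h, ih]
        split_ifs <;> simp
      · simp at h
        simp [List.takeWhile, h]

theorem pv_takeWhile_eq_self {α : Type} (p : α → Bool) (xs : List α) (h : xs.all p) :
    xs.takeWhile p = xs := by
  induction xs with
  | nil => rfl
  | cons a as ih =>
      simp at h
      simp [List.takeWhile, h.1, ih (by simp [List.all_eq_true]; exact h.2)]

theorem pv_startswith_hash (s : String)
    (h2 : PySem.Str.startswith s "##" = true) : PySem.Str.startswith s "#" = true := by
  rw [PySem.Str.startswith_eq, PySem.Chars.startswith_iff] at h2 ⊢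
  exact List.IsPrefix.trans (by decide) h2

-- the '##' test in A is subsumed by the '#' test
theorem pv_header_or (s : String) :
    (PySem.Str.startswith (PySem.Str.strip s) "##"
      || PySem.Str.startswith (PySem.Str.strip s) "#") = pvIsHeader s := by
  unfold pvIsHeader
  by_cases h : PySem.Str.startswith (PySem.Str.strip s) "#" = true
  · rw [h, Bool.or_true]
  · have h' : PySem.Str.startswith (PySem.Str.strip s) "#" = false := by
      cases hx : PySem.Str.startswith (PySem.Str.strip s) "#"
      · rfl
      · exact absurd hx h
    have h2 : PySem.Str.startswith (PySem.Str.strip s) "##" = false := by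
      cases hx : PySem.Str.startswith (PySem.Str.strip s) "##"
      · rfl
      · exact absurd (pv_startswith_hash _ hx) h
    rw [h', h2, Bool.or_false]

def pvTw (seg : List String) : List String := seg.takeWhile (fun l => !pvIsTrigger l)

def pvStepA (st : List String × Bool) (line : String) : List String × Bool :=
  let skip :=
    if PySem.Str.isIn "ADDITIONAL" (PySem.Str.upper line)
        || PySem.Str.isIn "ENHANCED" (PySem.Str.upper line) then
      true
    else if PySem.Str.startswith (PySem.Str.strip line) "##"
        || PySem.Str.startswith (PySem.Str.strip line) "#" then
      false
    else st.2
  (if !skip then st.1 ++ [line] else st.1, skip)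

def pvStepB (st : List (List String) × List String) (line : String) :
    List (List String) × List String :=
  if pvIsHeader line then (st.1 ++ [st.2], [line]) else (st.1, st.2 ++ [line])

-- A's step with its two tests named
theorem pvStepA_eq (st : List String × Bool) (l : String) :
    pvStepA st l =
      (let skip := if pvIsTrigger l then true else if pvIsHeader l then false else st.2
       (if !skip then st.1 ++ [l] else st.1, skip)) := by
  simp only [pvStepA, pvIsTrigger, pv_header_or]
  rfl

-- loop invariant: A's accumulator is the flattened kept-prefixes of B's finished
-- segments plus the kept prefix of the current segment, and A's skip flag records
-- whether the current segment already contains a trigger line.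
theorem pv_main (ls : List String) (segs : List (List String)) (cur : List String) :
    (ls.foldl pvStepA
        ((segs.map pvTw).flatten ++ pvTw cur, !cur.all (fun l => !pvIsTrigger l))).1
    = (((ls.foldl pvStepB (segs, cur)).1 ++ [(ls.foldl pvStepB (segs, cur)).2]).map pvTw).flatten := by
  induction ls generalizing segs cur with
  | nil => simp [pvTw]
  | cons l ls ih =>
      rw [List.foldl_cons, List.foldl_cons]
      by_cases ht : pvIsTrigger l = true
      · by_cases hh : pvIsHeader l = true
        · have eA : pvStepA ((segs.map pvTw).flatten ++ pvTw cur, !cur.all (fun l => !pvIsTrigger l)) l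
              = (((segs ++ [cur]).map pvTw).flatten ++ pvTw [l], !([l].all (fun x => !pvIsTrigger x))) := by
            rw [pvStepA_eq]
            simp [ht, pvTw, List.takeWhile]
          have eB : pvStepB (segs, cur) l = (segs ++ [cur], [l]) := by
            simp [pvStepB, hh]
          rw [eA, eB, ih]
        · have hcur : pvTw (cur ++ [l]) = pvTw cur := by
            unfold pvTw
            rw [pv_takeWhile_append_single]
            split_ifs with hall
            · rw [pv_takeWhile_eq_self _ _ hall]
              simp [List.takeWhile, ht]
            · rfl
          have eA : pvStepA ((segs.map pvTw).flatten ++ pvTw cur, !cur.all (fun l => !pvIsTrigger l)) l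
              = ((segs.map pvTw).flatten ++ pvTw (cur ++ [l]), !((cur ++ [l]).all (fun x => !pvIsTrigger x))) := by
            rw [pvStepA_eq]
            simp [ht, hcur]
          have eB : pvStepB (segs, cur) l = (segs, cur ++ [l]) := by
            simp [pvStepB, hh]
          rw [eA, eB, ih]
      · simp only [Bool.not_eq_true] at ht
        by_cases hh : pvIsHeader l = true
        · have eA : pvStepA ((segs.map pvTw).flatten ++ pvTw cur, !cur.all (fun l => !pvIsTrigger l)) l
              = (((segs ++ [cur]).map pvTw).flatten ++ pvTw [l], !([l].all (fun x => !pvIsTrigger x))) := by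
            rw [pvStepA_eq]
            simp [ht, hh, pvTw, List.takeWhile]
          have eB : pvStepB (segs, cur) l = (segs ++ [cur], [l]) := by
            simp [pvStepB, hh]
          rw [eA, eB, ih]
        · have hcur : pvTw (cur ++ [l]) =
              if cur.all (fun x => !pvIsTrigger x) then pvTw cur ++ [l] else pvTw cur := by
            unfold pvTw
            rw [pv_takeWhile_append_single]
            split_ifs with hall
            · rw [pv_takeWhile_eq_self _ _ hall]
              simp [List.takeWhile, ht]
            · rfl
          have eA : pvStepA ((segs.map pvTw).flatten ++ pvTw cur, !cur.all (fun l => !pvIsTrigger l)) l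
              = ((segs.map pvTw).flatten ++ pvTw (cur ++ [l]), !((cur ++ [l]).all (fun x => !pvIsTrigger x))) := by
            rw [pvStepA_eq]
            simp only [ht, hh, Bool.if_true_left]
            rw [hcur]
            by_cases hall : cur.all (fun x => !pvIsTrigger x) = true
            · simp [hall, ht]
            · simp only [Bool.not_eq_true] at hall
              simp [hall, ht]
          have eB : pvStepB (segs, cur) l = (segs, cur ++ [l]) := by
            simp [pvStepB, hh]
          rw [eA, eB, ih]

-- ===== VERDICT (by name: the statement is the Claim_ definition above) =====
theorem simplify_prompt_py_spec : Claim_equal_simplify_prompt_py := by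
  intro prompt _
  unfold Spec_simplify_prompt_py simplify_prompt_py simplify_prompt_py_alt
  have h := pv_main ((PySem.Str.split? prompt "\n").getD []) [] []
  simp only [List.map_nil, List.flatten_nil, List.nil_append, List.all_nil, Bool.not_true] at h
  rw [show pvTw [] = [] from rfl] at h
  rw [show (fun (st : List String × Bool) line =>
      ((if !(if PySem.Str.isIn "ADDITIONAL" (PySem.Str.upper line)
          || PySem.Str.isIn "ENHANCED" (PySem.Str.upper line) then true
        else if PySem.Str.startswith (PySem.Str.strip line) "##"
          || PySem.Str.startswith (PySem.Str.strip line) "#" then false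
        else st.2) then st.1 ++ [line] else st.1,
        if PySem.Str.isIn "ADDITIONAL" (PySem.Str.upper line)
          || PySem.Str.isIn "ENHANCED" (PySem.Str.upper line) then true
        else if PySem.Str.startswith (PySem.Str.strip line) "##"
          || PySem.Str.startswith (PySem.Str.strip line) "#" then false
        else st.2) : List String × Bool)) = pvStepA from rfl]
  rw [show (fun (st : List (List String) × List String) line =>
      if pvIsHeader line then (st.1 ++ [st.2], [line]) else (st.1, st.2 ++ [line])) = pvStepB from rfl]
  show PySem.Str.join "\n" ((List.foldl pvStepA ([], false) ((PySem.Str.split? prompt "\n").getD [])).1)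
    = PySem.Str.join "\n" (List.foldl (fun acc seg => acc ++ List.takeWhile (fun l => !pvIsTrigger l) seg) []
        ((List.foldl pvStepB ([], []) ((PySem.Str.split? prompt "\n").getD [])).1
          ++ [(List.foldl pvStepB ([], []) ((PySem.Str.split? prompt "\n").getD [])).2]))
  rw [h, PySem.List.foldl_append_eq_flatMap]
  simp [pvTw, List.flatMap]
  rfl
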